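-- pv_equiv track=rewrite | github.com/cls-health/toolbox | toolbox/db_toolkit.py | decrypt_roles
-- ===== SOURCE A (Python) =====
-- roles_dict = {
--   1: "ADMIN",
--   2: "RESEARCH",
--   4: "EXTERNAL",
--   8: "BILLING",
--   10: "BILLING_ADMIN",
--   20: "PATIENT_MANAGER",
--   40: "OC_ADMIN",
--   80: "OC_MANAGER",
--   100: "INFUSION_MANAGER",
--   200: "INFUSION_INTAKE",
--   400: "READ_ONLY",
--   800: "UNVERIFIED",
--   1000: "PATIENT",
--   2000: "BILLING_ERROR",
--   4000: "BILLING_ERROR_ADMIN",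
--   8000: "PROVIDER_MATCH",
--   10000: "SCORECARDS",
--   20000: "SCORECARDS_ADMIN"
-- }
--
-- def decrypt_roles(target_num):
--     target_num = int(target_num)
--     def func(num, nums:list=[]):
--         if sum(nums) == target_num or nums == None:
--             return [roles_dict[int(hex(dec).split('x')[1])] for dec in nums]
--         else:
--             for r in sorted(roles_dict.keys(), reverse=True):
--                 r = int(str(r),16)
--                 if r <= num and num % r == 0:
--                   nums.append(r)
--                   return func(num-r, nums)
--     return func(target_num, [])
-- ===== SOURCE B (Python) =====
-- # B: closed-form bit decoder. A repeatedly subtracts the largest flag dividing num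
-- # (= min(lowest set bit, 2**17)), which amounts to: the names of the set bits below
-- # bit 17 in ascending order, followed by (num >> 17) copies of the top flag's name.
-- _FLAG_NAMES = [
--     (1, "ADMIN"), (2, "RESEARCH"), (4, "EXTERNAL"), (8, "BILLING"),
--     (16, "BILLING_ADMIN"), (32, "PATIENT_MANAGER"), (64, "OC_ADMIN"),
--     (128, "OC_MANAGER"), (256, "INFUSION_MANAGER"), (512, "INFUSION_INTAKE"),
--     (1024, "READ_ONLY"), (2048, "UNVERIFIED"), (4096, "PATIENT"),
--     (8192, "BILLING_ERROR"), (16384, "BILLING_ERROR_ADMIN"),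
--     (32768, "PROVIDER_MATCH"), (65536, "SCORECARDS"), (131072, "SCORECARDS_ADMIN"),
-- ]
--
-- def decrypt_roles(target_num):
--     num = int(target_num)
--     if num < 0:
--         return None
--     names = [name for f, name in _FLAG_NAMES[:17] if (num // f) % 2 == 1]
--     names += ["SCORECARDS_ADMIN"] * (num // 131072)
--     return names
-- ===== Notes on version B (the rewrite author's own statement) =====
-- stated objective: simpler
-- what changed: A recursively subtracts the largest role flag dividing the remainder, re-sorting the key list and re-summing its accumulator at every step; B decodes the bitmask in closed form: one pass over the low flags with a parity test, then quotient-many copies of the capped top flag's name.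
import Mathlib
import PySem

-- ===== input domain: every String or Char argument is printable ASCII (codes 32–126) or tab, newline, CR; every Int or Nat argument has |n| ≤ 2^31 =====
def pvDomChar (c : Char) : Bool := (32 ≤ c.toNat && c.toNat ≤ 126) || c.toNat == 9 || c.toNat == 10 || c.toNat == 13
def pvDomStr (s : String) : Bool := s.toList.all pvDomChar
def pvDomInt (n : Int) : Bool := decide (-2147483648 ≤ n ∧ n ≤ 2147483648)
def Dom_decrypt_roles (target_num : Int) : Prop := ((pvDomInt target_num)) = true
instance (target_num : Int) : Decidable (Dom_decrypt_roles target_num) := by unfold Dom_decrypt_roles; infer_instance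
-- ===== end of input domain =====

-- B replaces A's recursive subtract-the-largest-dividing-flag search by a closed-form
-- bit decode (one pass over the 17 low flags plus a division for the capped top flag).

-- ===== PORT A =====
def rolesDict : PySem.Dict Int String := PySem.Dict.ofList
  [(1, "ADMIN"), (2, "RESEARCH"), (4, "EXTERNAL"), (8, "BILLING"), (10, "BILLING_ADMIN"),
   (20, "PATIENT_MANAGER"), (40, "OC_ADMIN"), (80, "OC_MANAGER"), (100, "INFUSION_MANAGER"),
   (200, "INFUSION_INTAKE"), (400, "READ_ONLY"), (800, "UNVERIFIED"), (1000, "PATIENT"),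
   (2000, "BILLING_ERROR"), (4000, "BILLING_ERROR_ADMIN"), (8000, "PROVIDER_MATCH"),
   (10000, "SCORECARDS"), (20000, "SCORECARDS_ADMIN")]

-- hex(n) for n > 0 (the only values it is applied to): '0x' + lowercase hex digits; exact there
def pyHex (n : Int) : String := String.ofList ('0' :: 'x' :: Nat.toDigits 16 n.toNat)

-- int(hex(dec).split('x')[1]) then roles_dict[...]: the IndexError/ValueError/KeyError branches
-- (pyGet?/ofStr?/get? = none) are unreachable for the flags A appends, so .getD defaults are inert
def nameOfA (dec : Int) : String :=
  (rolesDict.get? ((PySem.Int.ofStr?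
      ((PySem.List.pyGet? ((PySem.Str.split? (pyHex dec) "x").getD []) 1).getD "")).getD 0)).getD ""

-- r = int(str(r), 16)  (ValueError unreachable: keys are nonnegative decimal numerals)
def hexKey (k : Int) : Int := (PySem.Int.ofStrBase? (PySem.Int.toStr k) 16).getD 0

def sortedKeysA : List Int := PySem.List.sorted rolesDict.keys (fun x => x) true

-- the 'for r in sorted(...)' search: first key whose hex value divides num (and is ≤ num)
def loopA (num : Int) : List Int → Option Int
  | [] => none
  | k :: ks =>
    let r := hexKey k
    if r ≤ num ∧ PySem.Int.mod num r = 0 then some r else loopA num ks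

-- termination of func: any flag the search returns satisfies 1 ≤ r ≤ num
theorem loopA_bounds (num r : Int) : ∀ (l : List Int),
    (∀ k ∈ l, 1 ≤ hexKey k) → loopA num l = some r → 1 ≤ r ∧ r ≤ num := by
  intro l
  induction l with
  | nil => intro _ h; simp [loopA] at h
  | cons k ks ih =>
    intro hall h
    simp only [loopA] at h
    split at h
    · rename_i hc
      cases h
      exact ⟨hall k (by simp), hc.1⟩
    · exact ih (fun k' hk' => hall k' (List.mem_cons_of_mem _ hk')) h

theorem sortedKeysA_hex_pos : ∀ k ∈ sortedKeysA, 1 ≤ hexKey k := by decide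

-- def func(num, nums=[]): … ('nums == None' is always false: nums is always a list)
def funcA (target_num num : Int) (nums : List Int) : Option (List String) :=
  if nums.sum = target_num then some (nums.map nameOfA)
  else
    match h : loopA num sortedKeysA with
    | some r => funcA target_num (num - r) (nums ++ [r])
    | none => none
termination_by num.toNat
decreasing_by
  have := loopA_bounds num _ sortedKeysA sortedKeysA_hex_pos h
  omega

-- int(target_num) is the identity on an int argument
def decrypt_roles (target_num : Int) : Option (List String) :=
  funcA target_num target_num []

-- ===== PORT B =====
def flagsB : List (Int × String) :=
  [(1, "ADMIN"), (2, "RESEARCH"), (4, "EXTERNAL"), (8, "BILLING"), (16, "BILLING_ADMIN"),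
   (32, "PATIENT_MANAGER"), (64, "OC_ADMIN"), (128, "OC_MANAGER"), (256, "INFUSION_MANAGER"),
   (512, "INFUSION_INTAKE"), (1024, "READ_ONLY"), (2048, "UNVERIFIED"), (4096, "PATIENT"),
   (8192, "BILLING_ERROR"), (16384, "BILLING_ERROR_ADMIN"), (32768, "PROVIDER_MATCH"),
   (65536, "SCORECARDS"), (131072, "SCORECARDS_ADMIN")]

def decrypt_roles_alt (target_num : Int) : Option (List String) :=
  let num := target_num
  if num < 0 then none
  else
    -- [name for f, name in _FLAG_NAMES[:17] if (num // f) % 2 == 1]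
    let names := ((flagsB.take 17).filter
      (fun p => PySem.Int.mod (PySem.Int.floordiv num p.1) 2 = 1)).map Prod.snd
    -- ["SCORECARDS_ADMIN"] * (num // 131072): the count is nonnegative here, so .toNat is exact
    some (names ++ List.replicate (PySem.Int.floordiv num 131072).toNat "SCORECARDS_ADMIN")

-- ===== PRECONDITION & SPEC =====
-- Pre_ excludes large positive inputs: there CPython recurses once per subtracted flag, exceeds
-- the default recursion limit and A raises RecursionError; the bound keeps a safe margin below
-- that environment-dependent threshold (A was observed to return everywhere under the bound).
def Pre_decrypt_roles (target_num : Int) : Prop := target_num ≤ 67108864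
instance (target_num : Int) : Decidable (Pre_decrypt_roles target_num) := by
  unfold Pre_decrypt_roles; infer_instance
def pvWitness_decrypt_roles : Int := 12345

def Spec_decrypt_roles (target_num : Int) (out : Option (List String)) : Prop :=
  out = decrypt_roles_alt target_num
instance (target_num : Int) (out : Option (List String)) : Decidable (Spec_decrypt_roles target_num out) := by
  unfold Spec_decrypt_roles; infer_instance

-- ===== CLAIM (what is proved, stated in full; the proofs are below) =====
def Claim_equal_decrypt_roles : Prop := ∀ (target_num : Int), Dom_decrypt_roles target_num →
  Pre_decrypt_roles target_num → Spec_decrypt_roles target_num (decrypt_roles target_num)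

-- ===== LEMMAS AND PROOFS =====

def keysLit : List Int :=
  [20000, 10000, 8000, 4000, 2000, 1000, 800, 400, 200, 100, 80, 40, 20, 10, 8, 4, 2, 1]

theorem sortedKeysA_eq : sortedKeysA = keysLit := by decide

def flags17 : List (Int × String) := flagsB.take 17

-- B's body with PySem floordiv/mod replaced by ediv/emod (divisors are positive)
def eBody (num : Int) : List String :=
  (flags17.filter (fun p => decide (num / p.1 % 2 = 1))).map Prod.snd ++
    List.replicate ((num / 131072).toNat) "SCORECARDS_ADMIN"

theorem alt_eq_eBody (num : Int) :
    decrypt_roles_alt num = if num < 0 then none else some (eBody num) := by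
  by_cases hn : num < 0
  · simp [decrypt_roles_alt, hn]
  · simp only [decrypt_roles_alt, if_neg hn, eBody, flags17]
    rw [PySem.Int.floordiv_eq_ediv_of_pos (by norm_num)]
    have hf : (List.take 17 flagsB).filter
        (fun p => decide (PySem.Int.mod (PySem.Int.floordiv num p.1) 2 = 1)) =
        (List.take 17 flagsB).filter (fun p => decide (num / p.1 % 2 = 1)) := by
      refine List.filter_congr ?_
      intro p hp
      fin_cases hp <;>
      rw [PySem.Int.floordiv_eq_ediv_of_pos (by norm_num),
        PySem.Int.mod_eq_emod_of_pos (by norm_num)]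
    rw [hf]

-- (2*c*k + c) / (2*c*g) = k / g for 0 < c, 0 < g
theorem ediv_shift (c g k : Int) (hc : 0 < c) (hg : 0 < g) :
    (2 * c * k + c) / (2 * c * g) = k / g := by
  have h1 : 2 * c * k + c = c * (2 * k + 1) := by ring
  have h2 : 2 * c * g = c * (2 * g) := by ring
  rw [h1, h2, Int.mul_ediv_mul_of_pos _ _ hc]
  have hr0 : 0 ≤ k % g := Int.emod_nonneg k (by omega)
  have hr1 : k % g < g := Int.emod_lt_of_pos k hg
  have h3 : 2 * k + 1 = (2 * (k % g) + 1) + (2 * g) * (k / g) := by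
    linear_combination -2 * (Int.emod_add_ediv k g)
  rw [h3, Int.add_mul_ediv_left _ _ (by omega : (2 : Int) * g ≠ 0),
    Int.ediv_eq_zero_of_lt (by omega) (by omega)]
  omega

theorem ediv_cancel_shift (c g t : Int) (hc : 0 < c) (hg : 0 < g) :
    (2 * c * t) / (2 * c * g) = t / g := by
  have h2 : ∀ x : Int, 2 * c * x = (2 * c) * x := fun x => by ring
  rw [h2 t, h2 g, Int.mul_ediv_mul_of_pos _ _ (by omega)]

-- the bit tests agree between num' + c and num' on flags of the form 2*c*(positive)
theorem filter_step (c num' : Int) (hc : 0 < c) (hdvd : 2 * c ∣ num') :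
    ∀ (l : List (Int × String)), (∀ p ∈ l, ∃ g : Int, 0 < g ∧ p.1 = 2 * c * g) →
    l.filter (fun p => decide ((num' + c) / p.1 % 2 = 1)) =
      l.filter (fun p => decide (num' / p.1 % 2 = 1)) := by
  intro l
  induction l with
  | nil => intro _; rfl
  | cons p ps ih =>
    intro hall
    obtain ⟨g, hg, hpg⟩ := hall p (by simp)
    obtain ⟨t, ht⟩ := hdvd
    have hquot : (num' + c) / p.1 = num' / p.1 := by
      rw [hpg, ht]
      have : 2 * c * t + c = 2 * c * t + c := rfl
      rw [ediv_shift c g t hc hg, ediv_cancel_shift c g t hc hg]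
    simp only [List.filter_cons, hquot]
    rw [ih (fun q hq => hall q (List.mem_cons_of_mem _ hq))]

-- low flags (2*p.1 ∣ c ∣ num) never pass the bit test
theorem filter_low (c num : Int) (hdvd : c ∣ num) :
    ∀ (l : List (Int × String)), (∀ p ∈ l, 0 < p.1 ∧ 2 * p.1 ∣ c) →
    l.filter (fun p => decide (num / p.1 % 2 = 1)) = [] := by
  intro l
  induction l with
  | nil => intro _; rfl
  | cons p ps ih =>
    intro hall
    obtain ⟨hp0, hpc⟩ := hall p (by simp)
    obtain ⟨u, hu⟩ := hpc.trans hdvd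
    have hquot : num / p.1 % 2 = 0 := by
      have : num = p.1 * (2 * u) := by rw [hu]; ring
      rw [this, Int.mul_ediv_cancel_left _ (by omega)]
      omega
    simp only [List.filter_cons, hquot]
    simpa using ih (fun q hq => hall q (List.mem_cons_of_mem _ hq))

theorem flags17_getElem_fst : ∀ j, (h : j < 17) → (flags17[j]'(by simp [flags17, flagsB]; omega)).1 = 2 ^ j := by decide

theorem flags17_getElem_name : ∀ j, (h : j < 17) →
    nameOfA (2 ^ j) = (flags17[j]'(by simp [flags17, flagsB]; omega)).2 := by decide

theorem flags17_length : flags17.length = 17 := by decide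

-- one step of B's closed form: peeling the lowest set flag c = 2^j (num = c * odd)
theorem eBody_step (c : Int) (num : Int) (j : Nat) (hj : j < 17)
    (hc : c = 2 ^ j) (hdvd : c ∣ num) (hodd : num / c % 2 = 1) :
    eBody num = nameOfA c :: eBody (num - c) := by
  have hc0 : (0 : Int) < c := by rw [hc]; positivity
  obtain ⟨u, hu⟩ := hdvd
  have hdivc : num / c = u := by rw [hu, Int.mul_ediv_cancel_left _ (by omega)]
  rw [hdivc] at hodd
  set t : Int := u / 2 with htdef
  have hut : u = 2 * t + 1 := by omega
  have hnum : num = c * (2 * t + 1) := by rw [hu, hut]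
  have hnum' : num - c = 2 * c * t := by rw [hnum]; ring
  have hjlt : j < flags17.length := by rw [flags17_length]; exact hj
  have hsplit : flags17 = flags17.take j ++ flags17[j] :: flags17.drop (j + 1) := by
    rw [← List.drop_eq_getElem_cons hjlt, List.take_append_drop]
  have hpre : ∀ p ∈ flags17.take j, 0 < p.1 ∧ 2 * p.1 ∣ c := by
    intro p hp
    obtain ⟨i, hi, hpe⟩ := List.mem_iff_getElem.1 hp
    have hi' : i < j := by
      have := hi; simp [List.length_take, flags17_length] at this; omega
    have hil : i < flags17.length := by rw [flags17_length]; omega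
    have : p = flags17[i] := by
      rw [← hpe, List.getElem_take]
    rw [this, flags17_getElem_fst i (by omega)]
    constructor
    · positivity
    · rw [hc]
      have : (2 : Int) * 2 ^ i = 2 ^ (i + 1) := by ring
      rw [this]
      exact pow_dvd_pow 2 (by omega)
  have hsuf : ∀ p ∈ flags17.drop (j + 1), ∃ g : Int, 0 < g ∧ p.1 = 2 * c * g := by
    intro p hp
    obtain ⟨i, hi, hpe⟩ := List.mem_iff_getElem.1 hp
    have hil : j + 1 + i < flags17.length := by
      have := hi; simp [List.length_drop, flags17_length] at this ⊢; omega
    have : p = flags17[j + 1 + i] := by rw [← hpe, List.getElem_drop]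
    refine ⟨2 ^ i, by positivity, ?_⟩
    rw [this, flags17_getElem_fst (j + 1 + i) (by rw [flags17_length] at hil; omega), hc]
    rw [pow_add, pow_add]; ring
  have hheadf : (flags17[j]'hjlt).1 = c := by rw [flags17_getElem_fst j hj, hc]
  have hcnd1 : num / (flags17[j]'hjlt).1 % 2 = 1 := by rw [hheadf, hdivc]; omega
  have hcnd0 : (num - c) / (flags17[j]'hjlt).1 % 2 = 0 := by
    rw [hheadf, hnum']
    have : 2 * c * t = c * (2 * t) := by ring
    rw [this, Int.mul_ediv_cancel_left _ (by omega)]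
    omega
  have hrep : num / 131072 = (num - c) / 131072 := by
    have he : j + (16 - j) + 1 = 17 := by omega
    have h131 : (131072 : Int) = 2 * c * 2 ^ (16 - j) := by
      rw [hc]
      have h2 : (2 : Int) * 2 ^ j * 2 ^ (16 - j) = 2 ^ (j + (16 - j) + 1) := by
        rw [pow_add, pow_add]; ring
      rw [h2, he]
      norm_num
    have hg : (0 : Int) < 2 ^ (16 - j) := by positivity
    have hnum2 : num = 2 * c * t + c := by rw [hnum]; ring
    rw [h131, hnum2, show 2 * c * t + c - c = 2 * c * t from by ring,
      ediv_shift c _ t hc0 hg, ediv_cancel_shift c _ t hc0 hg]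
  unfold eBody
  rw [hsplit, List.filter_append, List.filter_append, List.filter_cons, List.filter_cons]
  rw [filter_low c num ⟨u, hu⟩ _ hpre, filter_low c (num - c) ⟨2 * t, by rw [hnum']; ring⟩ _ hpre]
  have hfs : (List.drop (j + 1) flags17).filter (fun p => decide (num / p.1 % 2 = 1)) =
      (List.drop (j + 1) flags17).filter (fun p => decide ((num - c) / p.1 % 2 = 1)) := by
    have h := filter_step c (num - c) hc0 ⟨t, hnum'⟩ _ hsuf
    rwa [show num - c + c = num from by ring] at h
  rw [hfs, hcnd1, hcnd0, ← hrep]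
  simp [flags17_getElem_name j hj, hc]

theorem eBody_hi (m : Int) (hm : 1 ≤ m) :
    eBody (131072 * m) = nameOfA 131072 :: eBody (131072 * m - 131072) := by
  have hall : ∀ p ∈ flags17, 0 < p.1 ∧ 2 * p.1 ∣ (131072 : Int) := by decide
  have hSA : nameOfA 131072 = "SCORECARDS_ADMIN" := by decide
  unfold eBody
  rw [filter_low 131072 _ ⟨m, rfl⟩ _ hall,
    filter_low 131072 _ ⟨m - 1, by ring⟩ _ hall]
  have h1 : (131072 * m) / 131072 = m := Int.mul_ediv_cancel_left _ (by norm_num)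
  have h2 : (131072 * m - 131072) / 131072 = m - 1 := by
    have : 131072 * m - 131072 = 131072 * (m - 1) := by ring
    rw [this, Int.mul_ediv_cancel_left _ (by norm_num)]
  rw [h1, h2, hSA]
  have hmt : m.toNat = (m - 1).toNat + 1 := by omega
  simp only [List.map_nil, List.nil_append]
  rw [hmt, List.replicate_succ]

-- one step of A's search over a prefix of failing keys
theorem loopA_of_prefix (num r : Int) : ∀ (l1 : List Int) (k : Int) (l2 : List Int),
    (∀ k' ∈ l1, ¬ (hexKey k' ≤ num ∧ PySem.Int.mod num (hexKey k') = 0)) →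
    (hexKey k ≤ num ∧ PySem.Int.mod num (hexKey k) = 0) → hexKey k = r →
    loopA num (l1 ++ k :: l2) = some r := by
  intro l1
  induction l1 with
  | nil =>
    intro k l2 _ hk hr
    simp only [List.nil_append, loopA]
    rw [if_pos hk, hr]
  | cons a l1 ih =>
    intro k l2 hall hk hr
    simp only [List.cons_append, loopA]
    rw [if_neg (hall a (by simp))]
    exact ih k l2 (fun k' hk' => hall k' (List.mem_cons_of_mem _ hk')) hk hr

theorem keysLit_hexKey : ∀ i, (h : i < 18) → hexKey (keysLit[i]'(by simp [keysLit]; omega)) = 2 ^ (17 - i) := by decide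

theorem keysLit_length : keysLit.length = 18 := by decide

theorem loopA_hi (num : Int) (h131 : 131072 ≤ num) (hdvd : (131072 : Int) ∣ num) :
    loopA num keysLit = some 131072 := by
  have h20000 : hexKey 20000 = 131072 := by decide
  have := loopA_of_prefix num 131072 [] 20000
    [10000, 8000, 4000, 2000, 1000, 800, 400, 200, 100, 80, 40, 20, 10, 8, 4, 2, 1]
    (by intro k' hk'; simp at hk')
    ⟨by rw [h20000]; exact h131, by rw [h20000]; exact (PySem.Int.mod_eq_zero_iff_dvd num 131072).2 hdvd⟩
    h20000
  simpa [keysLit] using this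

theorem loopA_lo (num : Int) (j : Nat) (hj : j < 17) (hdvd : (2 : Int) ^ j ∣ num)
    (hpos : 0 < num) (hnd : ¬ (2 : Int) ^ (j + 1) ∣ num) :
    loopA num keysLit = some (2 ^ j) := by
  have hlen : 17 - j < keysLit.length := by rw [keysLit_length]; omega
  have hsplit : keysLit = keysLit.take (17 - j) ++ keysLit[17 - j] :: keysLit.drop (17 - j + 1) := by
    rw [← List.drop_eq_getElem_cons hlen, List.take_append_drop]
  have hkhead : hexKey (keysLit[17 - j]'hlen) = 2 ^ j := by
    have := keysLit_hexKey (17 - j) (by omega)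
    rwa [show 17 - (17 - j) = j by omega] at this
  have hpre : ∀ k' ∈ keysLit.take (17 - j),
      ¬ (hexKey k' ≤ num ∧ PySem.Int.mod num (hexKey k') = 0) := by
    intro k' hk'
    obtain ⟨i, hi, hke⟩ := List.mem_iff_getElem.1 hk'
    have hi' : i < 17 - j := by
      have := hi; simp [List.length_take, keysLit_length] at this; omega
    have hil : i < keysLit.length := by rw [keysLit_length]; omega
    have hkeq : k' = keysLit[i] := by rw [← hke, List.getElem_take]
    rintro ⟨_, hmod⟩
    rw [hkeq, keysLit_hexKey i (by omega)] at hmod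
    have hdv : (2 : Int) ^ (17 - i) ∣ num := (PySem.Int.mod_eq_zero_iff_dvd _ _).1 hmod
    exact hnd (dvd_trans (pow_dvd_pow 2 (by omega)) hdv)
  have hcnd : hexKey (keysLit[17 - j]'hlen) ≤ num ∧
      PySem.Int.mod num (hexKey (keysLit[17 - j]'hlen)) = 0 := by
    rw [hkhead]
    exact ⟨Int.le_of_dvd hpos hdvd, (PySem.Int.mod_eq_zero_iff_dvd _ _).2 hdvd⟩
  calc loopA num keysLit
      = loopA num (keysLit.take (17 - j) ++ keysLit[17 - j] :: keysLit.drop (17 - j + 1)) := by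
        rw [← hsplit]
    _ = some (2 ^ j) := loopA_of_prefix num _ _ _ _ hpre hcnd hkhead

theorem decomp (num : Int) (h : 0 < num) :
    (∃ m : Int, 1 ≤ m ∧ num = 131072 * m) ∨
      (∃ j : Nat, j < 17 ∧ ∃ m : Int, 0 ≤ m ∧ num = 2 ^ j * (2 * m + 1)) := by
  have hne : num.toNat ≠ 0 := by omega
  obtain ⟨k, m, hmd, hn⟩ := Nat.exists_eq_pow_mul_and_not_dvd hne 2 (by norm_num)
  have hm1 : 1 ≤ m := by
    rcases Nat.eq_zero_or_pos m with h0 | h1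
    · exfalso; exact hmd (h0 ▸ dvd_zero 2)
    · omega
  have hodd : m % 2 = 1 := by omega
  have hnum : num = (2 : Int) ^ k * (m : Int) := by
    have : ((num.toNat : Int)) = num := by omega
    rw [← this, hn]
    push_cast
    ring
  by_cases hk : 17 ≤ k
  · left
    refine ⟨2 ^ (k - 17) * (m : Int), ?_, ?_⟩
    · have h1 : (1 : Int) ≤ 2 ^ (k - 17) := by
        have : (0 : Int) < 2 ^ (k - 17) := by positivity
        omega
      nlinarith [h1, (by exact_mod_cast hm1 : (1 : Int) ≤ (m : Int))]
    · rw [hnum]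
      have : (131072 : Int) = 2 ^ 17 := by norm_num
      rw [this, ← mul_assoc, ← pow_add]
      congr 2
      omega
  · right
    refine ⟨k, by omega, ((m : Int) - 1) / 2, by omega, ?_⟩
    rw [hnum]
    congr 1
    omega

theorem loopA_none_neg (num : Int) (h : num < 1) :
    ∀ (l : List Int), (∀ k ∈ l, 1 ≤ hexKey k) → loopA num l = none := by
  intro l
  induction l with
  | nil => intro _; rfl
  | cons k ks ih =>
    intro hall
    simp only [loopA]
    rw [if_neg]
    · exact ih (fun k' hk' => hall k' (List.mem_cons_of_mem _ hk'))
    · intro hcon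
      have := hall k (by simp)
      omega

theorem funcA_eq : ∀ (n : Nat) (num target : Int) (nums : List Int), num.toNat = n →
    0 ≤ num → nums.sum = target - num →
    funcA target num nums = some (nums.map nameOfA ++ eBody num) := by
  intro n
  induction n using Nat.strong_induction_on with
  | _ n ih =>
    intro num target nums hn h0 hsum
    rcases eq_or_lt_of_le h0 with heq | hpos
    · rw [funcA, if_pos (by omega : nums.sum = target)]
      have he : eBody 0 = [] := by decide
      rw [← heq, he, List.append_nil]
    · rw [funcA, if_neg (by omega : ¬ nums.sum = target)]
      have step : ∃ r : Int, 1 ≤ r ∧ r ≤ num ∧ loopA num sortedKeysA = some r ∧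
          eBody num = nameOfA r :: eBody (num - r) := by
        rcases decomp num hpos with ⟨m, hm, hnum⟩ | ⟨j, hj, m, hm, hnum⟩
        · refine ⟨131072, by norm_num, by omega, ?_, ?_⟩
          · rw [sortedKeysA_eq]
            exact loopA_hi num (by omega) ⟨m, hnum⟩
          · rw [hnum]
            have := eBody_hi m hm
            rw [this]
        · have hc0 : (0 : Int) < 2 ^ j := by positivity
          have hdvd : (2 : Int) ^ j ∣ num := ⟨2 * m + 1, hnum⟩
          have hodd : num / 2 ^ j % 2 = 1 := by
            rw [hnum, Int.mul_ediv_cancel_left _ (by omega)]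
            omega
          have h2j : (0 : Int) < 2 ^ j := by positivity
          refine ⟨2 ^ j, by omega, Int.le_of_dvd hpos hdvd, ?_, ?_⟩
          · rw [sortedKeysA_eq]
            refine loopA_lo num j hj hdvd hpos ?_
            rintro ⟨u, hu⟩
            rw [pow_succ] at hu
            have : 2 * m + 1 = 2 * u := by
              have := hu
              rw [hnum] at this
              have h2 : (2 : Int) ^ j * (2 * m + 1) = 2 ^ j * (2 * u) := by
                rw [this]; ring
              exact mul_left_cancel₀ (by omega) h2
            omega
          · exact eBody_step (2 ^ j) num j hj rfl hdvd hodd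
      obtain ⟨r, hr1, hrle, hloop, hbody⟩ := step
      split
      · rename_i r' heq
        rw [hloop] at heq
        injection heq with heq'
        subst heq'
        have hrec := ih (num - r).toNat (by omega) (num - r) target (nums ++ [r]) rfl (by omega)
          (by rw [List.sum_append]; simp; omega)
        rw [hrec, hbody]
        simp [List.map_append, List.append_assoc]
      · rename_i heq
        rw [hloop] at heq
        cases heq

-- ===== VERDICT (by name: the statement is the Claim_ definition above) =====
theorem decrypt_roles_spec : Claim_equal_decrypt_roles := by
  intro target _hdom _hpre
  show decrypt_roles target = decrypt_roles_alt target
  unfold decrypt_roles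
  by_cases hneg : target < 0
  · rw [funcA, if_neg (by simpa using (by omega : (0 : Int) ≠ target))]
    have hl : loopA target sortedKeysA = none :=
      loopA_none_neg target (by omega) sortedKeysA sortedKeysA_hex_pos
    split
    · rename_i r' heq
      rw [hl] at heq
      cases heq
    · simp [decrypt_roles_alt, hneg]
  · rw [funcA_eq target.toNat target target [] rfl (by omega) (by simp)]
    rw [alt_eq_eBody, if_neg hneg]
    simp
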